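-- pv_equiv track=rewrite | github.com/Wloner0809/msra-project | src/utils.py | parse_sectioned_prompt
-- ===== SOURCE A (Python) =====
-- import string
--
-- def parse_sectioned_prompt(s):
--     result = {}
--     current_header = None
--
--     for line in s.split("\n"):
--         line = line.strip()
--
--         if line.startswith("# "):
--             # first word without punctuation(第一个单词去掉标点符号)
--             current_header = line[2:].strip().lower().split()[0]
--             current_header = current_header.translate(
--                 str.maketrans("", "", string.punctuation)
--             )
--             result[current_header] = ""
--         elif current_header is not None:
--             result[current_header] += line + "\n"
--
--     return result
-- ===== SOURCE B (Python) =====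
-- import string
--
-- _PUNCT = str.maketrans("", "", string.punctuation)
--
--
-- def _skip_body(lines, i):
--     # advance i past non-header lines
--     while i < len(lines) and not lines[i].startswith("# "):
--         i += 1
--     return i
--
--
-- def parse_sectioned_prompt(s):
--     # Two-phase: locate header boundaries by index, then slice out each body.
--     lines = [ln.strip() for ln in s.split("\n")]
--     sections = []
--     i = _skip_body(lines, 0)          # lines before the first header are ignored
--     while i < len(lines):
--         key = lines[i][2:].strip().lower().split()[0].translate(_PUNCT)
--         j = _skip_body(lines, i + 1)
--         sections.append((key, "".join(ln + "\n" for ln in lines[i + 1:j])))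
--         i = j
--     return dict(sections)             # duplicate keys: first position, last body
-- ===== Notes on version B (the rewrite author's own statement) =====
-- stated objective: alternative
-- what changed: Replaces A's single stateful loop (current-header register plus string += into the dict) with a two-phase scan: an index helper locates header boundaries, then each section body is sliced out between consecutive boundaries, joined, and the (key, body) pairs are turned into a dict at the end.
import Mathlib
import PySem

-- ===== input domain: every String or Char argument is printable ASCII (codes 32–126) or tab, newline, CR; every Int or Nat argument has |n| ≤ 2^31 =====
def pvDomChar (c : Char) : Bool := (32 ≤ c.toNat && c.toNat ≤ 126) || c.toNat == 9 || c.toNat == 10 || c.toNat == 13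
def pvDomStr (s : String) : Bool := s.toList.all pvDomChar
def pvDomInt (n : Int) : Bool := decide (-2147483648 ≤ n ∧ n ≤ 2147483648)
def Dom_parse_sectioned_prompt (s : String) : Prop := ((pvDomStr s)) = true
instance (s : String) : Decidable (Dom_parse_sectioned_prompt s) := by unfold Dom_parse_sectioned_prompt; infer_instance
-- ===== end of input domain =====

-- B re-parses the text in two phases (find header boundary indices, then slice each body out)
-- instead of A's single stateful current-header accumulator loop; objective: alternative (same cost).

-- string.punctuation
def pvPunct : List Char := "!\"#$%&'()*+,-./:;<=>?@[\\]^_`{|}~".toList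

-- shared normalization both Pythons perform on a (stripped) header line:
-- line[2:].strip().lower().split()[0].translate(str.maketrans("", "", string.punctuation)).
-- translate with a delete-table is exactly a filter dropping those chars (hand port, exact);
-- split()[0] is ported as headD "" — unreachable: a stripped line starting with "# " always
-- has a non-space character after position 2, so split() is never empty (A never raises).
def pvNormKey (line : String) : String :=
  let w := (PySem.Str.split₀ (PySem.Str.lower (PySem.Str.strip (PySem.Str.slice line (some 2) none)))).headD ""
  String.ofList (w.toList.filter (fun c => !pvPunct.contains c))

-- ===== PORT A =====
def parse_sectioned_prompt (s : String) : List (String × String) :=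
  (((PySem.Str.split? s "\n").getD []).foldl
    (fun (st : PySem.Dict String String × Option String) rawLine =>
      let line := PySem.Str.strip rawLine
      if PySem.Str.startswith line "# " then
        let h := pvNormKey line
        (st.1.insert h "", some h)
      else
        match st.2 with
        | some h => (st.1.insert h (st.1.getD h "" ++ (line ++ "\n")), some h)  -- result[h] += line+"\n" (key h always present)
        | none => st)
    (PySem.Dict.empty, none)).1.items

-- ===== PORT B =====
-- _skip_body: advance i past non-header lines (the Python while loop, as recursion on length-i)
def pvSkipBody (lines : List String) (i : Nat) : Nat :=
  if h : i < lines.length then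
    if PySem.Str.startswith lines[i] "# " then i else pvSkipBody lines (i + 1)
  else i
termination_by lines.length - i

-- termination helper for pvSections (cited in decreasing_by)
theorem pvSkipBody_ge (lines : List String) (i : Nat) : i ≤ pvSkipBody lines i := by
  induction i using pvSkipBody.induct lines with
  | case1 i h hh => rw [pvSkipBody, dif_pos h, if_pos hh]
  | case2 i h hh ih => rw [pvSkipBody, dif_pos h, if_neg hh]; omega
  | case3 i h => rw [pvSkipBody, dif_neg h]

-- the while loop of B building the sections list (recursion on length-i)
def pvSections (lines : List String) (i : Nat) : List (String × String) :=
  if h : i < lines.length then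
    let key := pvNormKey lines[i]
    let j := pvSkipBody lines (i + 1)
    (key, PySem.Str.join "" ((PySem.List.slice lines (some ((i : Int) + 1)) (some (j : Int))).map (fun ln => ln ++ "\n")))
      :: pvSections lines j
  else []
termination_by lines.length - i
decreasing_by have := pvSkipBody_ge lines (i + 1); omega

def parse_sectioned_prompt_alt (s : String) : List (String × String) :=
  let lines := ((PySem.Str.split? s "\n").getD []).map PySem.Str.strip
  (PySem.Dict.ofList (pvSections lines (pvSkipBody lines 0))).items

-- ===== PRECONDITION & SPEC =====
def Spec_parse_sectioned_prompt (s : String) (out : List (String × String)) : Prop := out = parse_sectioned_prompt_alt s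
instance (s : String) (out : List (String × String)) : Decidable (Spec_parse_sectioned_prompt s out) := by unfold Spec_parse_sectioned_prompt; infer_instance

-- ===== CLAIM (what is proved, stated in full; the proofs are below) =====
def Claim_equal_parse_sectioned_prompt : Prop := ∀ (s : String), Dom_parse_sectioned_prompt s → Spec_parse_sectioned_prompt s (parse_sectioned_prompt s)

-- ===== LEMMAS AND PROOFS =====

-- abbreviations for the proofs
def pvHdr (ln : String) : Bool := PySem.Str.startswith ln "# "

def pvStepA (st : PySem.Dict String String × Option String) (line : String) :
    PySem.Dict String String × Option String :=
  if PySem.Str.startswith line "# " then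
    (st.1.insert (pvNormKey line) "", some (pvNormKey line))
  else
    match st.2 with
    | some h => (st.1.insert h (st.1.getD h "" ++ (line ++ "\n")), some h)
    | none => st

def pvConcat (body : List String) : String :=
  PySem.Str.join "" (body.map (fun ln => ln ++ "\n"))

-- structural (dropWhile/takeWhile) version of B's section scan, used as a bridge
def pvSectionsW (L : List String) : List (String × String) :=
  match _hL : L.dropWhile (fun ln => !pvHdr ln) with
  | [] => []
  | hd :: rest =>
      (pvNormKey hd, pvConcat (rest.takeWhile (fun ln => !pvHdr ln))) :: pvSectionsW rest
termination_by L.length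
decreasing_by
  have h1 : (L.dropWhile (fun ln => !pvHdr ln)).length ≤ L.length := L.length_dropWhile_le _
  rw [_hL] at h1; simp at h1; omega

def pvIns (d : PySem.Dict String String) (l : List (String × String)) : PySem.Dict String String :=
  l.foldl (fun acc p => acc.insert p.1 p.2) d

theorem pvConcat_nil : pvConcat [] = "" := by
  apply String.toList_inj.mp; simp [pvConcat, PySem.Str.toList_join, PySem.Chars.join_nil]

theorem pvConcat_cons (ln : String) (rest : List String) :
    pvConcat (ln :: rest) = (ln ++ "\n") ++ pvConcat rest := by
  apply String.toList_inj.mp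
  cases rest with
  | nil => simp [pvConcat, PySem.Str.toList_join, PySem.Chars.join_singleton, PySem.Chars.join_nil]
  | cons b l => simp [pvConcat, PySem.Str.toList_join, PySem.Chars.join_cons_cons]

theorem pvTakeWhile_eq_take {α : Type} (p : α → Bool) (l : List α) :
    l.takeWhile p = l.take (l.takeWhile p).length := by
  induction l with
  | nil => simp
  | cons a t ih => by_cases h : p a <;> simp [h] <;> exact ih

theorem pvDropWhile_eq_drop {α : Type} (p : α → Bool) (l : List α) :
    l.dropWhile p = l.drop (l.takeWhile p).length := by
  induction l with
  | nil => simp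
  | cons a t ih => by_cases h : p a <;> simp [h] <;> exact ih

-- E1: a run of body lines appended one by one to key h collapses to one insert
theorem pvBodyFold (body : List String) (d : PySem.Dict String String) (h : String) (v : String) :
    body.foldl (fun d ln => d.insert h (d.getD h "" ++ (ln ++ "\n"))) (d.insert h v)
      = d.insert h (v ++ pvConcat body) := by
  induction body generalizing v with
  | nil => simp [pvConcat_nil]
  | cons ln rest ih =>
    simp only [List.foldl_cons, PySem.Dict.getD_insert_self, PySem.Dict.insert_insert_self]
    rw [ih, pvConcat_cons, String.append_assoc]

-- with no current header, non-header lines do nothing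
theorem pvNoneFold (body : List String) (d : PySem.Dict String String)
    (hb : ∀ ln ∈ body, pvHdr ln = false) :
    body.foldl pvStepA (d, none) = (d, none) := by
  induction body with
  | nil => rfl
  | cons ln rest ih =>
    have h0 := hb ln (by simp)
    simp only [List.foldl_cons, pvStepA, pvHdr] at h0 ⊢
    rw [if_neg (by simpa using h0)]
    exact ih (fun x hx => hb x (by simp [hx]))

-- with current header h, a run of non-header lines appends to h
theorem pvSomeFold (body : List String) (d : PySem.Dict String String) (h : String)
    (hb : ∀ ln ∈ body, pvHdr ln = false) :
    body.foldl pvStepA (d, some h)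
      = (body.foldl (fun d ln => d.insert h (d.getD h "" ++ (ln ++ "\n"))) d, some h) := by
  induction body generalizing d with
  | nil => rfl
  | cons ln rest ih =>
    have h0 := hb ln (by simp)
    simp only [List.foldl_cons]
    rw [show pvStepA (d, some h) ln = (d.insert h (d.getD h "" ++ (ln ++ "\n")), some h) by
      simp only [pvStepA, pvHdr] at h0 ⊢; rw [if_neg (by simpa using h0)]]
    exact ih _ (fun x hx => hb x (by simp [hx]))

-- plain rewrite equations for pvSectionsW (its defining match is dependent)
theorem pvSectionsW_nil_eq (L : List String) (h : L.dropWhile (fun ln => !pvHdr ln) = []) :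
    pvSectionsW L = [] := by
  rw [pvSectionsW.eq_def]
  split
  · rfl
  · rename_i hd rest heq; rw [h] at heq; exact absurd heq (by simp)

theorem pvSectionsW_cons_eq (L : List String) (hd : String) (rest : List String)
    (h : L.dropWhile (fun ln => !pvHdr ln) = hd :: rest) :
    pvSectionsW L = (pvNormKey hd, pvConcat (rest.takeWhile (fun ln => !pvHdr ln))) :: pvSectionsW rest := by
  rw [pvSectionsW.eq_def]
  split
  · rename_i heq; rw [h] at heq; exact absurd heq (by simp)
  · rename_i hd' rest' heq; rw [h] at heq
    injection heq with h1 h2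
    subst h1; subst h2; rfl

-- pvSectionsW only looks at the input from its first header line on
theorem pvSectionsW_dropWhile (L : List String) :
    pvSectionsW (L.dropWhile (fun ln => !pvHdr ln)) = pvSectionsW L := by
  rcases hw : L.dropWhile (fun ln => !pvHdr ln) with _ | ⟨hd, rest⟩
  · rw [pvSectionsW_nil_eq L hw, pvSectionsW_nil_eq [] (by simp)]
  · rw [pvSectionsW_cons_eq L hd rest hw,
        pvSectionsW_cons_eq (hd :: rest) hd rest (by rw [← hw]; exact List.dropWhile_idempotent _ _)]

-- on a list that is empty or starts with a header, the current-header component is irrelevant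
theorem pvCurIrrel (rest : List String) (hr : ∀ a t, rest = a :: t → pvHdr a = true)
    (d : PySem.Dict String String) (k : String) :
    (rest.foldl pvStepA (d, some k)).1 = (rest.foldl pvStepA (d, none)).1 := by
  cases rest with
  | nil => rfl
  | cons a t =>
    have ha := hr a t rfl
    unfold pvHdr at ha
    simp only [List.foldl_cons]
    rw [show pvStepA (d, some k) a = pvStepA (d, none) a from by
      simp only [pvStepA]; rw [if_pos ha, if_pos ha]]

theorem pvMainAux (n : Nat) : ∀ (L : List String), L.length ≤ n → ∀ (d : PySem.Dict String String),
    (L.foldl pvStepA (d, none)).1 = pvIns d (pvSectionsW L) := by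
  induction n with
  | zero =>
    intro L hL d
    have hnil : L = [] := by
      cases L with
      | nil => rfl
      | cons a t => simp at hL
    subst hnil
    rw [pvSectionsW_nil_eq [] (by simp)]
    simp [pvIns]
  | succ n ih =>
    intro L hL d
    rcases hw : L.dropWhile (fun ln => !pvHdr ln) with _ | ⟨hd, rest⟩
    · have hall : ∀ ln ∈ L, pvHdr ln = false := by
        intro ln hln
        have := List.dropWhile_eq_nil_iff.mp hw ln hln
        simpa using this
      rw [pvNoneFold L d hall, pvSectionsW_nil_eq L hw]
      simp [pvIns]
    · have hhd : pvHdr hd = true := by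
        have := List.head?_dropWhile_not (fun ln => !pvHdr ln) L
        rw [hw] at this; simpa using this
      have hhd' := hhd
      unfold pvHdr at hhd'
      have hsplit : (L.takeWhile (fun ln => !pvHdr ln)) ++ (hd :: rest) = L := by
        rw [← hw]; exact List.takeWhile_append_dropWhile
      have htake : ∀ ln ∈ L.takeWhile (fun ln => !pvHdr ln), pvHdr ln = false := by
        intro ln hln; simpa using List.mem_takeWhile_imp hln
      have hlenr : rest.length ≤ n := by
        have h1 := congrArg List.length hsplit
        simp at h1
        omega
      conv_lhs => rw [← hsplit]
      rw [List.foldl_append, pvNoneFold _ d htake]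
      simp only [List.foldl_cons]
      rw [show pvStepA (d, none) hd = (d.insert (pvNormKey hd) "", some (pvNormKey hd)) from by
        simp only [pvStepA]; rw [if_pos hhd']]
      conv_lhs => rw [← List.takeWhile_append_dropWhile (p := fun ln => !pvHdr ln) (l := rest)]
      rw [List.foldl_append,
        pvSomeFold _ _ _ (fun x hx => by simpa using List.mem_takeWhile_imp hx),
        pvBodyFold, String.empty_append,
        pvCurIrrel _ (fun a t hat => by
          have := List.head?_dropWhile_not (fun ln => !pvHdr ln) rest
          rw [hat] at this; simpa using this),
        ih _ (le_trans (List.length_dropWhile_le _ _) hlenr)]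
      rw [pvSectionsW_dropWhile rest, pvSectionsW_cons_eq L hd rest hw]
      simp [pvIns]

-- main invariant: A's fold computes pvIns over the structural section list
theorem pvMain (L : List String) (d : PySem.Dict String String) :
    (L.foldl pvStepA (d, none)).1 = pvIns d (pvSectionsW L) := pvMainAux L.length L le_rfl d

-- skipBody in terms of takeWhile on the dropped list
theorem pvSkipBody_eq (lines : List String) (i : Nat) :
    pvSkipBody lines i = i + ((lines.drop i).takeWhile (fun ln => !pvHdr ln)).length := by
  induction i using pvSkipBody.induct lines with
  | case1 i h hh =>
    have hh' : pvHdr lines[i] = true := by unfold pvHdr; exact hh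
    rw [pvSkipBody, dif_pos h, if_pos hh, List.drop_eq_getElem_cons h]
    simp only [List.takeWhile_cons]
    rw [if_neg (by simp [hh'])]
    simp
  | case2 i h hh ih =>
    have hh' : pvHdr lines[i] = false := by unfold pvHdr; simpa using hh
    rw [pvSkipBody, dif_pos h, if_neg hh, ih, List.drop_eq_getElem_cons h]
    simp only [List.takeWhile_cons]
    rw [if_pos (by simp [hh'])]
    simp; omega
  | case3 i h =>
    rw [pvSkipBody, dif_neg h, List.drop_eq_nil_of_le (by omega)]
    simp

theorem pvSectionsAux (n : Nat) : ∀ (lines : List String) (i : Nat), lines.length - i ≤ n →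
    pvSections lines (pvSkipBody lines i) = pvSectionsW (lines.drop i) := by
  induction n with
  | zero =>
    intro lines i hn
    have hle : lines.length ≤ i := by omega
    rw [show pvSkipBody lines i = i from by rw [pvSkipBody, dif_neg (by omega)]]
    rw [pvSections, dif_neg (by omega), List.drop_eq_nil_of_le hle,
        pvSectionsW_nil_eq [] (by simp)]
  | succ n ih =>
    intro lines i hn
    have hge : i ≤ pvSkipBody lines i := pvSkipBody_ge lines i
    have hdw : (lines.drop i).dropWhile (fun ln => !pvHdr ln) = lines.drop (pvSkipBody lines i) := by
      rw [pvDropWhile_eq_drop, List.drop_drop, ← pvSkipBody_eq]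
    rcases hrest : lines.drop (pvSkipBody lines i) with _ | ⟨hd, rest⟩
    · have hlen : lines.length ≤ pvSkipBody lines i := List.drop_eq_nil_iff.mp hrest
      rw [pvSections, dif_neg (by omega), pvSectionsW_nil_eq _ (by rw [hdw, hrest])]
    · have hi'lt : pvSkipBody lines i < lines.length := by
        by_contra hc
        rw [List.drop_eq_nil_of_le (by omega)] at hrest
        exact absurd hrest (by simp)
      have hgetd := List.drop_eq_getElem_cons hi'lt
      rw [hrest] at hgetd
      injection hgetd with hhd hrst
      rw [pvSections, dif_pos hi'lt]
      rw [pvSectionsW_cons_eq _ hd rest (by rw [hdw, hrest])]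
      have hslice : PySem.List.slice lines (some ((pvSkipBody lines i : Int) + 1))
            (some ((pvSkipBody lines (pvSkipBody lines i + 1)) : Int))
          = rest.takeWhile (fun ln => !pvHdr ln) := by
        rw [show ((pvSkipBody lines i : Int) + 1) = ((pvSkipBody lines i + 1 : Nat) : Int) from by push_cast; ring]
        rw [PySem.List.slice_natCast, pvSkipBody_eq lines (pvSkipBody lines i + 1)]
        rw [Nat.add_sub_cancel_left, ← hrst]
        exact (pvTakeWhile_eq_take _ _).symm
      have htail : pvSections lines (pvSkipBody lines (pvSkipBody lines i + 1)) = pvSectionsW rest := by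
        rw [ih lines (pvSkipBody lines i + 1) (by omega), hrst]
      simp only [hslice, htail, pvConcat, hhd]

-- bridge: the index-based scan equals the structural one
theorem pvSections_eq (lines : List String) (i : Nat) :
    pvSections lines (pvSkipBody lines i) = pvSectionsW (lines.drop i) :=
  pvSectionsAux lines.length lines i (by omega)

-- ===== VERDICT (by name: the statement is the Claim_ definition above) =====
theorem parse_sectioned_prompt_spec : Claim_equal_parse_sectioned_prompt := by
  intro s _
  unfold Spec_parse_sectioned_prompt parse_sectioned_prompt parse_sectioned_prompt_alt
  have hfun : (fun (st : PySem.Dict String String × Option String) rawLine =>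
      let line := PySem.Str.strip rawLine
      if PySem.Str.startswith line "# " then
        let h := pvNormKey line
        (st.1.insert h "", some h)
      else
        match st.2 with
        | some h => (st.1.insert h (st.1.getD h "" ++ (line ++ "\n")), some h)
        | none => st) = (fun st raw => pvStepA st (PySem.Str.strip raw)) := rfl
  rw [hfun, ← List.foldl_map, pvMain]
  simp only [pvSections_eq, List.drop_zero]
  rfl
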